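-- pv_equiv track=rewrite | github.com/ZhanqiZhang66/Behavior-VAE | plotting/dwell_time.py | divide_with_delimiter
-- ===== SOURCE A (Python) =====
-- def divide_with_delimiter(lst):
--     # Example usage:
--     #X = [1, 1, 1, 2, 2, 3, 3, 3]
--     # result =  [1, 1, 1, 0, 1, 1, 0, 1, 1, 1]
--     #
--     chunks = []
--     for i, num in enumerate(lst):
--         if i == 0 or num != lst[i - 1]:
--             chunks.append([num])
--         else:
--             chunks[-1].append(num)
--
--     result_length = sum(len(chunk) + 1 for chunk in chunks) - 1
--     result = [0] * result_length
--     index = 0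
--     for chunk in chunks:
--         result[index:index + len(chunk)] = [1] * len(chunk)
--         index += len(chunk) + 1
--
--     return result
-- ===== SOURCE B (Python) =====
-- def divide_with_delimiter(lst):
--     result = []
--     for i, x in enumerate(lst):
--         if i > 0 and x != lst[i - 1]:
--             result.append(0)
--         result.append(1)
--     return result
-- ===== Notes on version B (the rewrite author's own statement) =====
-- stated objective: simpler
-- what changed: Single pass emitting 1s and run-boundary 0s directly, replacing A's chunks list-of-lists, length summation, preallocation and slice-fill second pass.
import Mathlib
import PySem

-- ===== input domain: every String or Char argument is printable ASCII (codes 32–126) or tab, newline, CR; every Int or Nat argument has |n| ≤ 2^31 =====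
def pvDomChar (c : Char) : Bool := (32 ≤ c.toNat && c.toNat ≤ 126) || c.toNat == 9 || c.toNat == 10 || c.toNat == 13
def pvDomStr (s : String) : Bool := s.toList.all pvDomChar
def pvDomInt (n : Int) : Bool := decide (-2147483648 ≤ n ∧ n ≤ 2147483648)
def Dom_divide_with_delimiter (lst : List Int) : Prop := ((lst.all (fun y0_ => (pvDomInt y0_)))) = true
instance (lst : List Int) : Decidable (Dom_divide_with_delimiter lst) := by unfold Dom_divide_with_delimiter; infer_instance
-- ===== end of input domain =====

-- B replaces A's chunks/prealloc/slice-fill construction by a single pass appending 1s and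
-- run-boundary 0s directly (objective: simpler; same O(n) cost).


-- ===== PORT A =====
-- Python slice assignment result[a:b] = ys; in A always 0 ≤ a ≤ b ≤ len and |ys| = b - a, where this is exact.
def pySliceAssign (res : List Int) (a b : Nat) (ys : List Int) : List Int :=
  res.take a ++ ys ++ res.drop b

def divide_with_delimiter (lst : List Int) : List Int :=
  -- for i, num in enumerate(lst): lst[i-1] via pyGetD (that branch has i ≥ 1, so exact)
  let chunks := (PySem.List.enumerate lst 0).foldl
    (fun chunks p =>
      if p.1 = 0 ∨ p.2 ≠ PySem.List.pyGetD lst (p.1 - 1) 0 then chunks ++ [[p.2]]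
      else chunks.dropLast ++ [chunks.getLastD [] ++ [p.2]]) []
  let result_length : Int := chunks.foldl (fun s c => s + ((c.length : Int) + 1)) 0 - 1
  -- Python's [0] * n is [] for negative n, so .toNat is exact
  let result := List.replicate result_length.toNat (0 : Int)
  let final := chunks.foldl
    (fun st c => (pySliceAssign st.1 st.2 (st.2 + c.length) (List.replicate c.length 1),
                  st.2 + c.length + 1)) (result, 0)
  final.1

-- ===== PORT B =====
def divide_with_delimiter_alt (lst : List Int) : List Int :=
  (PySem.List.enumerate lst 0).foldl
    (fun result p =>
      (if p.1 > 0 ∧ p.2 ≠ PySem.List.pyGetD lst (p.1 - 1) 0 then result ++ [0] else result) ++ [1])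
    []

-- ===== PRECONDITION & SPEC =====
def Spec_divide_with_delimiter (lst : List Int) (out : List Int) : Prop := out = divide_with_delimiter_alt lst
instance (lst : List Int) (out : List Int) : Decidable (Spec_divide_with_delimiter lst out) := by unfold Spec_divide_with_delimiter; infer_instance

-- ===== CLAIM (what is proved, stated in full; the proofs are below) =====
def Claim_equal_divide_with_delimiter : Prop := ∀ (lst : List Int), Dom_divide_with_delimiter lst → Spec_divide_with_delimiter lst (divide_with_delimiter lst)

-- ===== LEMMAS AND PROOFS =====

-- canonical one-pass spec: first element emits 1, later ones emit [1] or [0,1]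
def goSpec : Int → List Int → List Int
  | _, [] => []
  | p, x :: xs => (if x = p then [1] else [0, 1]) ++ goSpec x xs

-- each element of lst paired with its predecessor (none for the head)
def prevZip (lst : List Int) : List (Int × Option Int) := lst.zip (none :: lst.map some)

lemma prevZip_cons (x : Int) (xs : List Int) :
    prevZip (x :: xs) = (x, none) :: xs.zip ((x :: xs).map some) := by
  simp [prevZip]

lemma zip_some_cons (p x : Int) (xs : List Int) :
    (x :: xs).zip ((p :: x :: xs).map some) = (x, some p) :: xs.zip ((x :: xs).map some) := by
  simp

-- bridge: a fold over enumerate whose step only looks at the current element and lst[i-1]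
-- equals the fold over prevZip
lemma foldl_enumerate_prev {σ : Type} (lst : List Int) (f : σ → Int × Int → σ)
    (g : σ → Int × Option Int → σ)
    (h : ∀ s (k : Nat) (hk : k < lst.length),
      f s ((k : Int), lst[k]) = g s (lst[k], if k = 0 then none else some (lst.getD (k - 1) 0)))
    (s0 : σ) :
    (PySem.List.enumerate lst 0).foldl f s0 = (prevZip lst).foldl g s0 := by
  have hmap : (PySem.List.enumerate lst 0).map
      (fun p : Int × Int => (p.2, if p.1 = 0 then none else some (lst.getD (p.1 - 1).toNat 0)))
      = prevZip lst := by
    apply List.ext_getElem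
    · simp [prevZip, PySem.List.length_enumerate]
    · intro j hj hj'
      have hjl : j < lst.length := by simpa [PySem.List.length_enumerate] using hj
      simp only [List.getElem_map, PySem.List.getElem_enumerate, prevZip, List.getElem_zip]
      rcases j with _ | j
      · simp
      · have h1 : ((0 : Int) + (j + 1 : Nat) = 0) = False := by
          simp; omega
        have h2 : ((0 : Int) + (j + 1 : Nat) - 1).toNat = j := by omega
        simp only [h1, if_false, h2]
        have : j < lst.length := by omega
        simp [List.getD_eq_getElem?_getD, this, List.getElem_cons_succ]
  calc (PySem.List.enumerate lst 0).foldl f s0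
      = (PySem.List.enumerate lst 0).foldl
          (fun s p => g (s) (p.2, if p.1 = 0 then none else some (lst.getD (p.1 - 1).toNat 0))) s0 := by
        apply PySem.List.foldl_congr_mem
        intro acc p hp
        rcases (PySem.List.mem_enumerate_iff _ _ _).1 hp with ⟨k, hk, rfl⟩
        have := h acc k hk
        rcases k with _ | k
        · simpa using this
        · have h3 : ((0 : Int) + ((k + 1 : Nat) : Int)) = ((k + 1 : Nat) : Int) := by omega
          simp only [h3] at this ⊢
          rw [this]
          have h1 : ¬(((k + 1 : Nat) : Int) = 0) := by push_cast; omega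
          have h2 : ((((k + 1 : Nat)) : Int) - 1).toNat = k := by omega
          simp [h2]
          rw [if_neg (show ¬((k : Int) + 1 = 0) by omega)]
    _ = (prevZip lst).foldl g s0 := by rw [← hmap, List.foldl_map]

-- ---- A side ----

-- A's first loop in prevZip form
def stepAg (chunks : List (List Int)) (p : Int × Option Int) : List (List Int) :=
  match p.2 with
  | none => chunks ++ [[p.1]]
  | some v => if p.1 ≠ v then chunks ++ [[p.1]]
              else chunks.dropLast ++ [chunks.getLastD [] ++ [p.1]]

-- recursive characterisation of A's chunks
def g2 (cur : List Int) (p : Int) : List Int → List (List Int)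
  | [] => [cur]
  | x :: xs => if x = p then g2 (cur ++ [x]) x xs else cur :: g2 [x] x xs

lemma g2_ne_nil (cur : List Int) (p : Int) (xs : List Int) : g2 cur p xs ≠ [] := by
  induction xs generalizing cur p with
  | nil => simp [g2]
  | cons x xs ih =>
      simp only [g2]
      split
      · exact ih _ _
      · simp

lemma chunksFold (xs : List Int) : ∀ (p : Int) (C : List (List Int)) (cur : List Int),
    (xs.zip ((p :: xs).map some)).foldl stepAg (C ++ [cur]) = C ++ g2 cur p xs := by
  induction xs with
  | nil => intro p C cur; simp [g2]
  | cons x xs ih =>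
      intro p C cur
      rw [zip_some_cons]
      simp only [List.foldl_cons]
      by_cases hxp : x = p
      · have : stepAg (C ++ [cur]) (x, some p) = C ++ [cur ++ [x]] := by
          simp [stepAg, hxp]
        rw [this, ih x C (cur ++ [x])]
        simp [g2, hxp]
      · have : stepAg (C ++ [cur]) (x, some p) = (C ++ [cur]) ++ [[x]] := by
          simp [stepAg, hxp]
        rw [this, ih x (C ++ [cur]) [x]]
        simp [g2, hxp]

-- natural-number total length ingredient
def Nlen (cs : List (List Int)) : Nat := (cs.map (fun c => c.length + 1)).sum

lemma foldl_len_int (cs : List (List Int)) : ∀ (a : Int),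
    cs.foldl (fun s c => s + ((c.length : Int) + 1)) a = a + (Nlen cs : Int) := by
  induction cs with
  | nil => intro a; simp [Nlen]
  | cons c cs ih =>
      intro a
      simp only [List.foldl_cons]
      rw [ih]
      have : Nlen (c :: cs) = c.length + 1 + Nlen cs := by simp [Nlen]
      rw [this]
      push_cast
      ring

-- rendering of chunks: blocks of 1s separated by single 0s
def render : List (List Int) → List Int
  | [] => []
  | [c] => List.replicate c.length 1
  | c :: c' :: cs => List.replicate c.length 1 ++ 0 :: render (c' :: cs)

lemma render_cons (c : List Int) (cs : List (List Int)) (h : cs ≠ []) :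
    render (c :: cs) = List.replicate c.length 1 ++ 0 :: render cs := by
  cases cs with
  | nil => exact absurd rfl h
  | cons c' cs' => rfl

lemma phase2 : ∀ (cs : List (List Int)) (done : List Int), cs ≠ [] →
    (cs.foldl
      (fun st c => (pySliceAssign st.1 st.2 (st.2 + c.length) (List.replicate c.length 1),
                    st.2 + c.length + 1))
      (done ++ List.replicate (Nlen cs - 1) 0, done.length)).1 = done ++ render cs := by
  intro cs
  induction cs with
  | nil => intro done h; exact absurd rfl h
  | cons c cs ih =>
      intro done _
      have hN : Nlen (c :: cs) - 1 = c.length + Nlen cs := by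
        simp only [Nlen, List.map_cons, List.sum_cons]; omega
      simp only [List.foldl_cons]
      have htake : (done ++ List.replicate (Nlen (c :: cs) - 1) (0 : Int)).take done.length = done := by
        simp
      have hdrop : (done ++ List.replicate (Nlen (c :: cs) - 1) (0 : Int)).drop (done.length + c.length)
          = List.replicate (Nlen cs) 0 := by
        rw [hN, List.drop_append]
        simp [List.drop_replicate]
      have hslice : pySliceAssign (done ++ List.replicate (Nlen (c :: cs) - 1) 0) done.length
          (done.length + c.length) (List.replicate c.length 1)
          = done ++ List.replicate c.length 1 ++ List.replicate (Nlen cs) 0 := by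
        simp [pySliceAssign, htake, hdrop]
      rw [hslice]
      cases cs with
      | nil =>
          simp [render, Nlen]
      | cons c' cs' =>
          have hpos : 1 ≤ Nlen (c' :: cs') := by
            simp only [Nlen, List.map_cons, List.sum_cons]; omega
          have hrep : List.replicate (Nlen (c' :: cs')) (0 : Int)
              = 0 :: List.replicate (Nlen (c' :: cs') - 1) 0 := by
            have h' : Nlen (c' :: cs') = (Nlen (c' :: cs') - 1) + 1 := by omega
            conv_lhs => rw [h']
            rw [List.replicate_succ]
          rw [hrep]
          have hassoc : done ++ List.replicate c.length (1 : Int) ++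
              (0 :: List.replicate (Nlen (c' :: cs') - 1) 0)
              = (done ++ List.replicate c.length 1 ++ [0]) ++ List.replicate (Nlen (c' :: cs') - 1) 0 := by
            simp
          have hlen : done.length + c.length + 1 = (done ++ List.replicate c.length (1 : Int) ++ [0]).length := by
            simp
            omega
          rw [hassoc, hlen, ih (done ++ List.replicate c.length 1 ++ [0]) (by simp)]
          rw [render_cons c (c' :: cs') (by simp)]
          simp

lemma render_g2 (xs : List Int) : ∀ (cur : List Int) (p : Int),
    render (g2 cur p xs) = List.replicate cur.length 1 ++ goSpec p xs := by
  induction xs with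
  | nil => intro cur p; simp [g2, render, goSpec]
  | cons x xs ih =>
      intro cur p
      by_cases hxp : x = p
      · simp only [g2]
        rw [if_pos hxp, ih]
        simp [goSpec, hxp, List.replicate_succ']
      · simp only [g2]
        rw [if_neg hxp]
        rw [render_cons _ _ (g2_ne_nil _ _ _), ih]
        simp [goSpec, hxp, List.replicate_succ]

-- ---- B side ----

def stepBg (r : List Int) (p : Int × Option Int) : List Int :=
  (match p.2 with
   | none => r
   | some v => if p.1 ≠ v then r ++ [0] else r) ++ [1]

lemma foldB (xs : List Int) : ∀ (p : Int) (r : List Int),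
    (xs.zip ((p :: xs).map some)).foldl stepBg r = r ++ goSpec p xs := by
  induction xs with
  | nil => intro p r; simp [goSpec]
  | cons x xs ih =>
      intro p r
      rw [zip_some_cons]
      simp only [List.foldl_cons]
      by_cases hxp : x = p
      · have : stepBg r (x, some p) = r ++ [1] := by simp [stepBg, hxp]
        rw [this, ih x (r ++ [1])]
        simp [goSpec, hxp]
      · have : stepBg r (x, some p) = r ++ [0, 1] := by simp [stepBg, hxp]
        rw [this, ih x (r ++ [0, 1])]
        simp [goSpec, hxp]

-- ---- assembling both sides ----

lemma stepA_eq (lst : List Int) (s : List (List Int)) (k : Nat) (hk : k < lst.length) :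
    (fun chunks (p : Int × Int) =>
      if p.1 = 0 ∨ p.2 ≠ PySem.List.pyGetD lst (p.1 - 1) 0 then chunks ++ [[p.2]]
      else chunks.dropLast ++ [chunks.getLastD [] ++ [p.2]]) s ((k : Int), lst[k])
    = stepAg s (lst[k], if k = 0 then none else some (lst.getD (k - 1) 0)) := by
  rcases k with _ | k
  · simp [stepAg]
  · have hc : ¬(((k + 1 : Nat) : Int) = 0) := by push_cast; omega
    have h2 : ((k + 1 : Nat) : Int) - 1 = ((k : Nat) : Int) := by omega
    simp only [hc, false_or, h2, PySem.List.pyGetD_natCast, stepAg]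
    by_cases hne : lst[k + 1] = lst.getD k 0
    · simp [hne]
    · simp [hne]

lemma stepB_eq (lst : List Int) (s : List Int) (k : Nat) (hk : k < lst.length) :
    (fun result (p : Int × Int) =>
      (if p.1 > 0 ∧ p.2 ≠ PySem.List.pyGetD lst (p.1 - 1) 0 then result ++ [0] else result) ++ [1])
      s ((k : Int), lst[k])
    = stepBg s (lst[k], if k = 0 then none else some (lst.getD (k - 1) 0)) := by
  rcases k with _ | k
  · simp [stepBg]
  · have h1 : ((0 : Int) < ((k + 1 : Nat) : Int)) := by positivity
    have h2 : ((k + 1 : Nat) : Int) - 1 = ((k : Nat) : Int) := by omega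
    simp only [h2, PySem.List.pyGetD_natCast, stepBg]
    by_cases hne : lst[k + 1] = lst.getD k 0
    · simp [hne]
    · simp [hne, h1]

lemma B_eq_spec (lst : List Int) :
    divide_with_delimiter_alt lst
      = match lst with | [] => [] | x :: xs => 1 :: goSpec x xs := by
  unfold divide_with_delimiter_alt
  rw [foldl_enumerate_prev lst _ stepBg (fun s k hk => stepB_eq lst s k hk)]
  cases lst with
  | nil => simp [prevZip]
  | cons x xs =>
      rw [prevZip_cons]
      simp only [List.foldl_cons]
      have : stepBg [] (x, none) = [1] := by simp [stepBg]
      rw [this, foldB xs x [1]]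
      simp

lemma A_eq_spec (lst : List Int) :
    divide_with_delimiter lst
      = match lst with | [] => [] | x :: xs => 1 :: goSpec x xs := by
  unfold divide_with_delimiter
  rw [foldl_enumerate_prev lst _ stepAg (fun s k hk => stepA_eq lst s k hk)]
  cases lst with
  | nil => simp [prevZip]
  | cons x xs =>
      rw [prevZip_cons]
      simp only [List.foldl_cons]
      have hstep : stepAg [] (x, none) = [[x]] := by simp [stepAg]
      rw [hstep]
      have hchunks : (xs.zip ((x :: xs).map some)).foldl stepAg [[x]] = g2 [x] x xs := by
        have := chunksFold xs x [] [x]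
        simpa using this
      rw [hchunks]
      have hlen : (g2 [x] x xs).foldl (fun s c => s + ((c.length : Int) + 1)) 0
          = (Nlen (g2 [x] x xs) : Int) := by
        rw [foldl_len_int]; ring
      rw [hlen]
      have htoNat : ((Nlen (g2 [x] x xs) : Int) - 1).toNat = Nlen (g2 [x] x xs) - 1 := by omega
      rw [htoNat]
      have := phase2 (g2 [x] x xs) [] (g2_ne_nil _ _ _)
      simp only [List.nil_append, List.length_nil] at this
      rw [this, render_g2]
      simp

-- ===== VERDICT (by name: the statement is the Claim_ definition above) =====
theorem divide_with_delimiter_spec : Claim_equal_divide_with_delimiter := by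
  intro lst _
  unfold Spec_divide_with_delimiter
  rw [A_eq_spec, B_eq_spec]
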